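-- pv_equiv track=rewrite | github.com/RyanBuss01/patent_person_enrichment | scripts/verify_filtered_people.py | clean_last_name
-- ===== SOURCE A (Python) =====
-- from typing import Any, Dict, Iterable, List, Optional, Tuple
--
-- def clean_string(value: Optional[str]) -> str:
--     if not value or str(value).lower() in {"nan", "none", "null", ""}:
--         return ""
--     return str(value).strip()
--
-- def clean_last_name(lastname: Optional[str]) -> str:
--     cleaned = clean_string(lastname).lower()
--     suffixes = [
--         ", jr.", ", jr", " jr.", " jr",
--         ", sr.", ", sr", " sr.", " sr",
--         ", ii", ", iii", ", iv", ", v",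
--         " ii", " iii", " iv", " v"
--     ]
--     for suffix in suffixes:
--         if cleaned.endswith(suffix):
--             return cleaned[: -len(suffix)].strip()
--     return cleaned
-- ===== SOURCE B (Python) =====
-- def clean_string(value):
--     if not value or str(value).lower() in {"nan", "none", "null", ""}:
--         return ""
--     return str(value).strip()
--
-- _SUFFIX_TOKENS = {"jr.", "jr", "sr.", "sr", "ii", "iii", "iv", "v"}
--
-- def clean_last_name(lastname):
--     # No 16-way suffix loop: split once at the last space and test the tail
--     # token, stripping one optional trailing comma from the head.
--     cleaned = clean_string(lastname).lower()
--     head, sep, tail = cleaned.rpartition(' ')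
--     if sep and tail in _SUFFIX_TOKENS:
--         if head.endswith(','):
--             head = head[:-1]
--         return head.strip()
--     return cleaned
-- ===== Notes on version B (the rewrite author's own statement) =====
-- stated objective: idiomatic
-- what changed: Replaced the 16-iteration ordered endswith-suffix loop by a single rpartition at the last space, an 8-element token membership test and one optional trailing-comma removal.
import Mathlib
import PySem

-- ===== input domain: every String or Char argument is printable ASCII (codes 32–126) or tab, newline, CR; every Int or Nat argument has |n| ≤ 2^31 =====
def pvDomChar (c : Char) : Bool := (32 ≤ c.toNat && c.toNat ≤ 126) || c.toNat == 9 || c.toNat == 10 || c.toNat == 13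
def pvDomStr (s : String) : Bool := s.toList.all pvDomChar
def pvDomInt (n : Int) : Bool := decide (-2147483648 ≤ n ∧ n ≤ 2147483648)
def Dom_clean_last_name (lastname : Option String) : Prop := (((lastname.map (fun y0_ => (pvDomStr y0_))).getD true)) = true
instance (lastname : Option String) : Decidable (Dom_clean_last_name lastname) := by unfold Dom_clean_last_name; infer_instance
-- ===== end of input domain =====

-- B replaces A's 16-iteration ordered endswith-suffix loop by one rpartition at the last
-- space, an 8-token membership test and an optional trailing-comma removal (idiomatic; same cost).

-- ===== PORT A =====
def clean_string (value : Option String) : String :=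
  match value with
  | none => ""
  | some s =>
    if s = "" ∨ PySem.Str.lower s ∈ (["nan", "none", "null", ""] : List String) then ""
    else PySem.Str.strip s

def pvSuffixesA : List String :=
  [", jr.", ", jr", " jr.", " jr",
   ", sr.", ", sr", " sr.", " sr",
   ", ii", ", iii", ", iv", ", v",
   " ii", " iii", " iv", " v"]

-- the 'for suffix in suffixes: if cleaned.endswith(suffix): return …' loop
def pvCleanLoopA (cleaned : String) : List String → String
  | [] => cleaned
  | suffix :: rest =>
    if PySem.Str.endswith cleaned suffix then
      PySem.Str.strip (PySem.Str.slice cleaned none (some (-(PySem.Str.len suffix))))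
    else pvCleanLoopA cleaned rest

def clean_last_name (lastname : Option String) : String :=
  pvCleanLoopA (PySem.Str.lower (clean_string lastname)) pvSuffixesA

-- ===== PORT B =====
-- the 8 suffix tokens, as char lists (Source B's _SUFFIX_TOKENS set)
def pvTokensB : List (List Char) :=
  [['j','r','.'], ['j','r'], ['s','r','.'], ['s','r'],
   ['i','i'], ['i','i','i'], ['i','v'], ['v']]

-- cleaned.rpartition(' ') ported by hand (exact): the chars after the LAST
-- space are the reversed longest space-free suffix of the reversed string.
def pvCoreB (cleaned : String) : String :=
  let r := cleaned.toList.reverse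
  let tailR := r.takeWhile (fun c => c ≠ ' ')
  match r.drop tailR.length with
  | [] => cleaned                       -- sep = '': no space in cleaned
  | _ :: headR =>                       -- drop the separating space
    if tailR.reverse ∈ pvTokensB then
      let headR' := if headR.head? = some ',' then headR.tail else headR
      String.ofList (PySem.Chars.strip headR'.reverse)
    else cleaned

def clean_last_name_alt (lastname : Option String) : String :=
  pvCoreB (PySem.Str.lower (clean_string lastname))

-- ===== PRECONDITION & SPEC =====
def Spec_clean_last_name (lastname : Option String) (out : String) : Prop := out = clean_last_name_alt lastname
instance (lastname : Option String) (out : String) : Decidable (Spec_clean_last_name lastname out) := by unfold Spec_clean_last_name; infer_instance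

-- ===== CLAIM (what is proved, stated in full; the proofs are below) =====
def Claim_equal_clean_last_name : Prop := ∀ (lastname : Option String), Dom_clean_last_name lastname → Spec_clean_last_name lastname (clean_last_name lastname)

-- ===== LEMMAS AND PROOFS =====
-- endswith is a reversed prefix test
theorem ends_rev (l s : List Char) :
    PySem.Chars.endswith l s = decide (s.reverse <+: l.reverse) := by
  rcases h : PySem.Chars.endswith l s with _ | _
  · rw [eq_comm, decide_eq_false_iff_not, List.reverse_prefix]
    rw [Bool.eq_false_iff, Ne, PySem.Chars.endswith_iff] at h; exact h
  · rw [PySem.Chars.endswith_iff] at h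
    simp [List.reverse_prefix, h]

-- takeWhile of a space-free block followed by a space
theorem pvTW (t z : List Char) (ht : ∀ x ∈ t, x ≠ ' ') :
    List.takeWhile (fun c => !decide (c = ' ')) (t ++ ' ' :: z) = t := by
  induction t with
  | nil => simp
  | cons a t ih => simp_all

-- the first character dropWhile (≠ ' ') exposes is a space
theorem pvHeadDrop (l t : List Char) (c : Char)
    (hq : List.dropWhile (fun c => !decide (c = ' ')) l = c :: t) : c = ' ' := by
  induction l with
  | nil => simp at hq
  | cons a l ih =>
    by_cases ha : a = ' '
    · rw [List.dropWhile_cons_of_neg (by simp [ha])] at hq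
      injection hq with h1 _
      exact h1 ▸ ha
    · rw [List.dropWhile_cons_of_pos (by simp [ha])] at hq
      exact ih hq

-- a "space-free block ++ space" pattern pins the block: a different block cannot be a prefix
theorem pvNoPrefix (p h t u : List Char) (hp : ∀ x ∈ p, x ≠ ' ')
    (ht : ∀ x ∈ t, x ≠ ' ') (hne : t ≠ p) :
    ¬ ((t ++ ' ' :: u) <+: (p ++ ' ' :: h)) := by
  rintro ⟨w, hw⟩
  apply hne
  have hw' : t ++ ' ' :: (u ++ w) = p ++ ' ' :: h := by
    simpa [List.append_assoc] using hw
  have h1 := pvTW t (u ++ w) ht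
  have h2 := pvTW p h hp
  rw [← h1, hw', h2]

-- a pattern containing a space is no prefix of a space-free list
theorem pvNoSpacePrefix (r t : List Char) (hall : ∀ x ∈ r, x ≠ ' ')
    (hmem : ' ' ∈ t) : ¬ (t <+: r) :=
  fun hpre => hall ' ' (hpre.subset hmem) rfl

-- the heart of the claim: A's 16-suffix loop equals B's rpartition-based core
theorem pvCore_eq (cleaned : String) :
    pvCleanLoopA cleaned pvSuffixesA = pvCoreB cleaned := by
  rcases hq : cleaned.toList.reverse.dropWhile (fun c => !decide (c = ' ')) with _ | ⟨c, headR⟩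
  · -- no space in cleaned: no suffix can match, both sides return cleaned
    have hall : ∀ x ∈ cleaned.toList.reverse, x ≠ ' ' := by
      intro x hx
      have := List.dropWhile_eq_nil_iff.mp hq x hx
      simpa using this
    have htw : cleaned.toList.reverse.takeWhile (fun c => !decide (c = ' ')) = cleaned.toList.reverse := by
      conv_rhs => rw [← List.takeWhile_append_dropWhile (p := (fun c => !decide (c = ' ')))
        (l := cleaned.toList.reverse)]
      rw [hq, List.append_nil]
    have hdrop : List.drop cleaned.length cleaned.toList.reverse = ([] : List Char) := by
      rw [show cleaned.length = cleaned.toList.reverse.length by simp, List.drop_length]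
    have hy0 : ¬ (['.', 'r', 'j', ' ', ','] <+: cleaned.toList.reverse) :=
      pvNoSpacePrefix _ _ hall (by decide)
    have hy1 : ¬ (['r', 'j', ' ', ','] <+: cleaned.toList.reverse) :=
      pvNoSpacePrefix _ _ hall (by decide)
    have hy2 : ¬ (['.', 'r', 'j', ' '] <+: cleaned.toList.reverse) :=
      pvNoSpacePrefix _ _ hall (by decide)
    have hy3 : ¬ (['r', 'j', ' '] <+: cleaned.toList.reverse) :=
      pvNoSpacePrefix _ _ hall (by decide)
    have hy4 : ¬ (['.', 'r', 's', ' ', ','] <+: cleaned.toList.reverse) :=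
      pvNoSpacePrefix _ _ hall (by decide)
    have hy5 : ¬ (['r', 's', ' ', ','] <+: cleaned.toList.reverse) :=
      pvNoSpacePrefix _ _ hall (by decide)
    have hy6 : ¬ (['.', 'r', 's', ' '] <+: cleaned.toList.reverse) :=
      pvNoSpacePrefix _ _ hall (by decide)
    have hy7 : ¬ (['r', 's', ' '] <+: cleaned.toList.reverse) :=
      pvNoSpacePrefix _ _ hall (by decide)
    have hy8 : ¬ (['i', 'i', ' ', ','] <+: cleaned.toList.reverse) :=
      pvNoSpacePrefix _ _ hall (by decide)
    have hy9 : ¬ (['i', 'i', 'i', ' ', ','] <+: cleaned.toList.reverse) :=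
      pvNoSpacePrefix _ _ hall (by decide)
    have hy10 : ¬ (['v', 'i', ' ', ','] <+: cleaned.toList.reverse) :=
      pvNoSpacePrefix _ _ hall (by decide)
    have hy11 : ¬ (['v', ' ', ','] <+: cleaned.toList.reverse) :=
      pvNoSpacePrefix _ _ hall (by decide)
    have hy12 : ¬ (['i', 'i', ' '] <+: cleaned.toList.reverse) :=
      pvNoSpacePrefix _ _ hall (by decide)
    have hy13 : ¬ (['i', 'i', 'i', ' '] <+: cleaned.toList.reverse) :=
      pvNoSpacePrefix _ _ hall (by decide)
    have hy14 : ¬ (['v', 'i', ' '] <+: cleaned.toList.reverse) :=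
      pvNoSpacePrefix _ _ hall (by decide)
    have hy15 : ¬ (['v', ' '] <+: cleaned.toList.reverse) :=
      pvNoSpacePrefix _ _ hall (by decide)
    simp [pvCleanLoopA, pvSuffixesA, pvCoreB, ends_rev, htw, hdrop,
      hy0, hy1, hy2, hy3, hy4, hy5, hy6, hy7, hy8, hy9, hy10, hy11, hy12, hy13, hy14, hy15]
  · have hc : c = ' ' := pvHeadDrop _ _ _ hq
    subst hc
    have hr0 : cleaned.toList.reverse =
        cleaned.toList.reverse.takeWhile (fun c => !decide (c = ' ')) ++ ' ' :: headR := by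
      conv_lhs => rw [← List.takeWhile_append_dropWhile (p := (fun c => !decide (c = ' ')))
        (l := cleaned.toList.reverse)]
      rw [hq]
    by_cases htok : (cleaned.toList.reverse.takeWhile (fun c => !decide (c = ' '))).reverse ∈ pvTokensB
    swap
    · -- the token after the last space is not a suffix token: both sides return cleaned
      obtain ⟨p, hpdef, hr⟩ : ∃ p, p = cleaned.toList.reverse.takeWhile (fun c => !decide (c = ' ')) ∧
          cleaned.toList.reverse = p ++ ' ' :: headR := ⟨_, rfl, hr0⟩
      have hp : ∀ x ∈ p, x ≠ ' ' := by
        intro x hx; rw [hpdef] at hx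
        have := List.mem_takeWhile_imp hx; simpa using this
      have htwp : List.takeWhile (fun c => !decide (c = ' ')) (p ++ ' ' :: headR) = p := pvTW p headR hp
      have htok2 : ¬ (p.reverse ∈ pvTokensB) := by rw [hpdef]; exact htok
      have hx0 : ¬ ((['.', 'r', 'j'] ++ ' ' :: [',']) <+: (p ++ ' ' :: headR)) :=
        pvNoPrefix p headR ['.', 'r', 'j'] [','] hp (by simp)
          (fun hEq => htok (by rw [← hpdef, ← hEq]; decide))
      have hx1 : ¬ ((['r', 'j'] ++ ' ' :: [',']) <+: (p ++ ' ' :: headR)) :=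
        pvNoPrefix p headR ['r', 'j'] [','] hp (by simp)
          (fun hEq => htok (by rw [← hpdef, ← hEq]; decide))
      have hx2 : ¬ ((['.', 'r', 'j'] ++ ' ' :: ([] : List Char)) <+: (p ++ ' ' :: headR)) :=
        pvNoPrefix p headR ['.', 'r', 'j'] ([] : List Char) hp (by simp)
          (fun hEq => htok (by rw [← hpdef, ← hEq]; decide))
      have hx3 : ¬ ((['r', 'j'] ++ ' ' :: ([] : List Char)) <+: (p ++ ' ' :: headR)) :=
        pvNoPrefix p headR ['r', 'j'] ([] : List Char) hp (by simp)
          (fun hEq => htok (by rw [← hpdef, ← hEq]; decide))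
      have hx4 : ¬ ((['.', 'r', 's'] ++ ' ' :: [',']) <+: (p ++ ' ' :: headR)) :=
        pvNoPrefix p headR ['.', 'r', 's'] [','] hp (by simp)
          (fun hEq => htok (by rw [← hpdef, ← hEq]; decide))
      have hx5 : ¬ ((['r', 's'] ++ ' ' :: [',']) <+: (p ++ ' ' :: headR)) :=
        pvNoPrefix p headR ['r', 's'] [','] hp (by simp)
          (fun hEq => htok (by rw [← hpdef, ← hEq]; decide))
      have hx6 : ¬ ((['.', 'r', 's'] ++ ' ' :: ([] : List Char)) <+: (p ++ ' ' :: headR)) :=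
        pvNoPrefix p headR ['.', 'r', 's'] ([] : List Char) hp (by simp)
          (fun hEq => htok (by rw [← hpdef, ← hEq]; decide))
      have hx7 : ¬ ((['r', 's'] ++ ' ' :: ([] : List Char)) <+: (p ++ ' ' :: headR)) :=
        pvNoPrefix p headR ['r', 's'] ([] : List Char) hp (by simp)
          (fun hEq => htok (by rw [← hpdef, ← hEq]; decide))
      have hx8 : ¬ ((['i', 'i'] ++ ' ' :: [',']) <+: (p ++ ' ' :: headR)) :=
        pvNoPrefix p headR ['i', 'i'] [','] hp (by simp)
          (fun hEq => htok (by rw [← hpdef, ← hEq]; decide))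
      have hx9 : ¬ ((['i', 'i', 'i'] ++ ' ' :: [',']) <+: (p ++ ' ' :: headR)) :=
        pvNoPrefix p headR ['i', 'i', 'i'] [','] hp (by simp)
          (fun hEq => htok (by rw [← hpdef, ← hEq]; decide))
      have hx10 : ¬ ((['v', 'i'] ++ ' ' :: [',']) <+: (p ++ ' ' :: headR)) :=
        pvNoPrefix p headR ['v', 'i'] [','] hp (by simp)
          (fun hEq => htok (by rw [← hpdef, ← hEq]; decide))
      have hx11 : ¬ ((['v'] ++ ' ' :: [',']) <+: (p ++ ' ' :: headR)) :=
        pvNoPrefix p headR ['v'] [','] hp (by simp)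
          (fun hEq => htok (by rw [← hpdef, ← hEq]; decide))
      have hx12 : ¬ ((['i', 'i'] ++ ' ' :: ([] : List Char)) <+: (p ++ ' ' :: headR)) :=
        pvNoPrefix p headR ['i', 'i'] ([] : List Char) hp (by simp)
          (fun hEq => htok (by rw [← hpdef, ← hEq]; decide))
      have hx13 : ¬ ((['i', 'i', 'i'] ++ ' ' :: ([] : List Char)) <+: (p ++ ' ' :: headR)) :=
        pvNoPrefix p headR ['i', 'i', 'i'] ([] : List Char) hp (by simp)
          (fun hEq => htok (by rw [← hpdef, ← hEq]; decide))
      have hx14 : ¬ ((['v', 'i'] ++ ' ' :: ([] : List Char)) <+: (p ++ ' ' :: headR)) :=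
        pvNoPrefix p headR ['v', 'i'] ([] : List Char) hp (by simp)
          (fun hEq => htok (by rw [← hpdef, ← hEq]; decide))
      have hx15 : ¬ ((['v'] ++ ' ' :: ([] : List Char)) <+: (p ++ ' ' :: headR)) :=
        pvNoPrefix p headR ['v'] ([] : List Char) hp (by simp)
          (fun hEq => htok (by rw [← hpdef, ← hEq]; decide))
      simp only [List.cons_append, List.nil_append] at hx0 hx1 hx2 hx3 hx4 hx5 hx6 hx7 hx8 hx9 hx10 hx11 hx12 hx13 hx14 hx15
      simp [pvCleanLoopA, pvSuffixesA, pvCoreB, pvTokensB, ends_rev, hr, htwp, hx0, hx1, hx2, hx3, hx4, hx5, hx6, hx7, hx8, hx9, hx10, hx11, hx12, hx13, hx14, hx15]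
      intro hor
      exact absurd (by rcases hor with h|h|h|h|h|h|h|h <;> simp [pvTokensB, h]) htok2
    simp [pvTokensB] at htok
    rcases htok with h | h | h | h | h | h | h | h
    · -- token "jr."
      have htw : cleaned.toList.reverse.takeWhile (fun c => !decide (c = ' ')) = ['.', 'r', 'j'] := by
        have := congrArg List.reverse h; simpa using this
      rw [htw] at hr0
      rcases headR with _ | ⟨c2, z⟩
      · -- cleaned = " jr." with empty head
        simp only [pvCleanLoopA, pvSuffixesA]
        simp [ends_rev, hr0, List.cons_prefix_cons, pvCoreB, pvTokensB]
        refine String.toList_inj.mp ?_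
        have hl : cleaned.toList = ' ' :: ['j', 'r', '.'] := by
          have := congrArg List.reverse hr0; simpa using this
        simp only [PySem.Str.toList_strip, PySem.Str.toList_slice, String.toList_ofList,
          PySem.Chars.slice_eq_listSlice]
        rw [PySem.List.slice_to_neg_ofNat _ 4 (by omega), hl]
        simp
      · by_cases hc2 : c2 = ','
        · -- ", jr." matches
          subst hc2
          have hl : cleaned.toList = z.reverse ++ [',', ' ', 'j', 'r', '.'] := by
            have := congrArg List.reverse hr0; simpa using this
          simp only [pvCleanLoopA, pvSuffixesA]
          simp [ends_rev, hr0, List.cons_prefix_cons, pvCoreB, pvTokensB]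
          refine String.toList_inj.mp ?_
          simp only [PySem.Str.toList_strip, PySem.Str.toList_slice, String.toList_ofList,
            PySem.Chars.slice_eq_listSlice]
          rw [PySem.List.slice_to_neg_ofNat _ 5 (by omega), hl]
          rw [show (z.reverse ++ [',', ' ', 'j', 'r', '.']).length - 5 = z.reverse.length by simp]
          rw [List.take_left]
        · -- " jr." matches, the head keeps c2
          have hl : cleaned.toList = (z.reverse ++ [c2]) ++ [' ', 'j', 'r', '.'] := by
            have := congrArg List.reverse hr0; simpa using this
          simp only [pvCleanLoopA, pvSuffixesA]
          simp [ends_rev, hr0, List.cons_prefix_cons, pvCoreB, pvTokensB, hc2, Ne.symm hc2]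
          refine String.toList_inj.mp ?_
          simp only [PySem.Str.toList_strip, PySem.Str.toList_slice, String.toList_ofList,
            PySem.Chars.slice_eq_listSlice]
          rw [PySem.List.slice_to_neg_ofNat _ 4 (by omega), hl]
          rw [show ((z.reverse ++ [c2]) ++ [' ', 'j', 'r', '.']).length - 4 = (z.reverse ++ [c2]).length by simp]
          rw [List.take_left]
    · -- token "jr"
      have htw : cleaned.toList.reverse.takeWhile (fun c => !decide (c = ' ')) = ['r', 'j'] := by
        have := congrArg List.reverse h; simpa using this
      rw [htw] at hr0
      rcases headR with _ | ⟨c2, z⟩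
      · -- cleaned = " jr" with empty head
        simp only [pvCleanLoopA, pvSuffixesA]
        simp [ends_rev, hr0, List.cons_prefix_cons, pvCoreB, pvTokensB]
        refine String.toList_inj.mp ?_
        have hl : cleaned.toList = ' ' :: ['j', 'r'] := by
          have := congrArg List.reverse hr0; simpa using this
        simp only [PySem.Str.toList_strip, PySem.Str.toList_slice, String.toList_ofList,
          PySem.Chars.slice_eq_listSlice]
        rw [PySem.List.slice_to_neg_ofNat _ 3 (by omega), hl]
        simp
      · by_cases hc2 : c2 = ','
        · -- ", jr" matches
          subst hc2
          have hl : cleaned.toList = z.reverse ++ [',', ' ', 'j', 'r'] := by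
            have := congrArg List.reverse hr0; simpa using this
          simp only [pvCleanLoopA, pvSuffixesA]
          simp [ends_rev, hr0, List.cons_prefix_cons, pvCoreB, pvTokensB]
          refine String.toList_inj.mp ?_
          simp only [PySem.Str.toList_strip, PySem.Str.toList_slice, String.toList_ofList,
            PySem.Chars.slice_eq_listSlice]
          rw [PySem.List.slice_to_neg_ofNat _ 4 (by omega), hl]
          rw [show (z.reverse ++ [',', ' ', 'j', 'r']).length - 4 = z.reverse.length by simp]
          rw [List.take_left]
        · -- " jr" matches, the head keeps c2
          have hl : cleaned.toList = (z.reverse ++ [c2]) ++ [' ', 'j', 'r'] := by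
            have := congrArg List.reverse hr0; simpa using this
          simp only [pvCleanLoopA, pvSuffixesA]
          simp [ends_rev, hr0, List.cons_prefix_cons, pvCoreB, pvTokensB, hc2, Ne.symm hc2]
          refine String.toList_inj.mp ?_
          simp only [PySem.Str.toList_strip, PySem.Str.toList_slice, String.toList_ofList,
            PySem.Chars.slice_eq_listSlice]
          rw [PySem.List.slice_to_neg_ofNat _ 3 (by omega), hl]
          rw [show ((z.reverse ++ [c2]) ++ [' ', 'j', 'r']).length - 3 = (z.reverse ++ [c2]).length by simp]
          rw [List.take_left]
    · -- token "sr."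
      have htw : cleaned.toList.reverse.takeWhile (fun c => !decide (c = ' ')) = ['.', 'r', 's'] := by
        have := congrArg List.reverse h; simpa using this
      rw [htw] at hr0
      rcases headR with _ | ⟨c2, z⟩
      · -- cleaned = " sr." with empty head
        simp only [pvCleanLoopA, pvSuffixesA]
        simp [ends_rev, hr0, List.cons_prefix_cons, pvCoreB, pvTokensB]
        refine String.toList_inj.mp ?_
        have hl : cleaned.toList = ' ' :: ['s', 'r', '.'] := by
          have := congrArg List.reverse hr0; simpa using this
        simp only [PySem.Str.toList_strip, PySem.Str.toList_slice, String.toList_ofList,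
          PySem.Chars.slice_eq_listSlice]
        rw [PySem.List.slice_to_neg_ofNat _ 4 (by omega), hl]
        simp
      · by_cases hc2 : c2 = ','
        · -- ", sr." matches
          subst hc2
          have hl : cleaned.toList = z.reverse ++ [',', ' ', 's', 'r', '.'] := by
            have := congrArg List.reverse hr0; simpa using this
          simp only [pvCleanLoopA, pvSuffixesA]
          simp [ends_rev, hr0, List.cons_prefix_cons, pvCoreB, pvTokensB]
          refine String.toList_inj.mp ?_
          simp only [PySem.Str.toList_strip, PySem.Str.toList_slice, String.toList_ofList,
            PySem.Chars.slice_eq_listSlice]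
          rw [PySem.List.slice_to_neg_ofNat _ 5 (by omega), hl]
          rw [show (z.reverse ++ [',', ' ', 's', 'r', '.']).length - 5 = z.reverse.length by simp]
          rw [List.take_left]
        · -- " sr." matches, the head keeps c2
          have hl : cleaned.toList = (z.reverse ++ [c2]) ++ [' ', 's', 'r', '.'] := by
            have := congrArg List.reverse hr0; simpa using this
          simp only [pvCleanLoopA, pvSuffixesA]
          simp [ends_rev, hr0, List.cons_prefix_cons, pvCoreB, pvTokensB, hc2, Ne.symm hc2]
          refine String.toList_inj.mp ?_
          simp only [PySem.Str.toList_strip, PySem.Str.toList_slice, String.toList_ofList,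
            PySem.Chars.slice_eq_listSlice]
          rw [PySem.List.slice_to_neg_ofNat _ 4 (by omega), hl]
          rw [show ((z.reverse ++ [c2]) ++ [' ', 's', 'r', '.']).length - 4 = (z.reverse ++ [c2]).length by simp]
          rw [List.take_left]
    · -- token "sr"
      have htw : cleaned.toList.reverse.takeWhile (fun c => !decide (c = ' ')) = ['r', 's'] := by
        have := congrArg List.reverse h; simpa using this
      rw [htw] at hr0
      rcases headR with _ | ⟨c2, z⟩
      · -- cleaned = " sr" with empty head
        simp only [pvCleanLoopA, pvSuffixesA]
        simp [ends_rev, hr0, List.cons_prefix_cons, pvCoreB, pvTokensB]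
        refine String.toList_inj.mp ?_
        have hl : cleaned.toList = ' ' :: ['s', 'r'] := by
          have := congrArg List.reverse hr0; simpa using this
        simp only [PySem.Str.toList_strip, PySem.Str.toList_slice, String.toList_ofList,
          PySem.Chars.slice_eq_listSlice]
        rw [PySem.List.slice_to_neg_ofNat _ 3 (by omega), hl]
        simp
      · by_cases hc2 : c2 = ','
        · -- ", sr" matches
          subst hc2
          have hl : cleaned.toList = z.reverse ++ [',', ' ', 's', 'r'] := by
            have := congrArg List.reverse hr0; simpa using this
          simp only [pvCleanLoopA, pvSuffixesA]
          simp [ends_rev, hr0, List.cons_prefix_cons, pvCoreB, pvTokensB]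
          refine String.toList_inj.mp ?_
          simp only [PySem.Str.toList_strip, PySem.Str.toList_slice, String.toList_ofList,
            PySem.Chars.slice_eq_listSlice]
          rw [PySem.List.slice_to_neg_ofNat _ 4 (by omega), hl]
          rw [show (z.reverse ++ [',', ' ', 's', 'r']).length - 4 = z.reverse.length by simp]
          rw [List.take_left]
        · -- " sr" matches, the head keeps c2
          have hl : cleaned.toList = (z.reverse ++ [c2]) ++ [' ', 's', 'r'] := by
            have := congrArg List.reverse hr0; simpa using this
          simp only [pvCleanLoopA, pvSuffixesA]
          simp [ends_rev, hr0, List.cons_prefix_cons, pvCoreB, pvTokensB, hc2, Ne.symm hc2]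
          refine String.toList_inj.mp ?_
          simp only [PySem.Str.toList_strip, PySem.Str.toList_slice, String.toList_ofList,
            PySem.Chars.slice_eq_listSlice]
          rw [PySem.List.slice_to_neg_ofNat _ 3 (by omega), hl]
          rw [show ((z.reverse ++ [c2]) ++ [' ', 's', 'r']).length - 3 = (z.reverse ++ [c2]).length by simp]
          rw [List.take_left]
    · -- token "ii"
      have htw : cleaned.toList.reverse.takeWhile (fun c => !decide (c = ' ')) = ['i', 'i'] := by
        have := congrArg List.reverse h; simpa using this
      rw [htw] at hr0
      rcases headR with _ | ⟨c2, z⟩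
      · -- cleaned = " ii" with empty head
        simp only [pvCleanLoopA, pvSuffixesA]
        simp [ends_rev, hr0, List.cons_prefix_cons, pvCoreB, pvTokensB]
        refine String.toList_inj.mp ?_
        have hl : cleaned.toList = ' ' :: ['i', 'i'] := by
          have := congrArg List.reverse hr0; simpa using this
        simp only [PySem.Str.toList_strip, PySem.Str.toList_slice, String.toList_ofList,
          PySem.Chars.slice_eq_listSlice]
        rw [PySem.List.slice_to_neg_ofNat _ 3 (by omega), hl]
        simp
      · by_cases hc2 : c2 = ','
        · -- ", ii" matches
          subst hc2
          have hl : cleaned.toList = z.reverse ++ [',', ' ', 'i', 'i'] := by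
            have := congrArg List.reverse hr0; simpa using this
          simp only [pvCleanLoopA, pvSuffixesA]
          simp [ends_rev, hr0, List.cons_prefix_cons, pvCoreB, pvTokensB]
          refine String.toList_inj.mp ?_
          simp only [PySem.Str.toList_strip, PySem.Str.toList_slice, String.toList_ofList,
            PySem.Chars.slice_eq_listSlice]
          rw [PySem.List.slice_to_neg_ofNat _ 4 (by omega), hl]
          rw [show (z.reverse ++ [',', ' ', 'i', 'i']).length - 4 = z.reverse.length by simp]
          rw [List.take_left]
        · -- " ii" matches, the head keeps c2
          have hl : cleaned.toList = (z.reverse ++ [c2]) ++ [' ', 'i', 'i'] := by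
            have := congrArg List.reverse hr0; simpa using this
          simp only [pvCleanLoopA, pvSuffixesA]
          simp [ends_rev, hr0, List.cons_prefix_cons, pvCoreB, pvTokensB, hc2, Ne.symm hc2]
          refine String.toList_inj.mp ?_
          simp only [PySem.Str.toList_strip, PySem.Str.toList_slice, String.toList_ofList,
            PySem.Chars.slice_eq_listSlice]
          rw [PySem.List.slice_to_neg_ofNat _ 3 (by omega), hl]
          rw [show ((z.reverse ++ [c2]) ++ [' ', 'i', 'i']).length - 3 = (z.reverse ++ [c2]).length by simp]
          rw [List.take_left]
    · -- token "iii"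
      have htw : cleaned.toList.reverse.takeWhile (fun c => !decide (c = ' ')) = ['i', 'i', 'i'] := by
        have := congrArg List.reverse h; simpa using this
      rw [htw] at hr0
      rcases headR with _ | ⟨c2, z⟩
      · -- cleaned = " iii" with empty head
        simp only [pvCleanLoopA, pvSuffixesA]
        simp [ends_rev, hr0, List.cons_prefix_cons, pvCoreB, pvTokensB]
        refine String.toList_inj.mp ?_
        have hl : cleaned.toList = ' ' :: ['i', 'i', 'i'] := by
          have := congrArg List.reverse hr0; simpa using this
        simp only [PySem.Str.toList_strip, PySem.Str.toList_slice, String.toList_ofList,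
          PySem.Chars.slice_eq_listSlice]
        rw [PySem.List.slice_to_neg_ofNat _ 4 (by omega), hl]
        simp
      · by_cases hc2 : c2 = ','
        · -- ", iii" matches
          subst hc2
          have hl : cleaned.toList = z.reverse ++ [',', ' ', 'i', 'i', 'i'] := by
            have := congrArg List.reverse hr0; simpa using this
          simp only [pvCleanLoopA, pvSuffixesA]
          simp [ends_rev, hr0, List.cons_prefix_cons, pvCoreB, pvTokensB]
          refine String.toList_inj.mp ?_
          simp only [PySem.Str.toList_strip, PySem.Str.toList_slice, String.toList_ofList,
            PySem.Chars.slice_eq_listSlice]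
          rw [PySem.List.slice_to_neg_ofNat _ 5 (by omega), hl]
          rw [show (z.reverse ++ [',', ' ', 'i', 'i', 'i']).length - 5 = z.reverse.length by simp]
          rw [List.take_left]
        · -- " iii" matches, the head keeps c2
          have hl : cleaned.toList = (z.reverse ++ [c2]) ++ [' ', 'i', 'i', 'i'] := by
            have := congrArg List.reverse hr0; simpa using this
          simp only [pvCleanLoopA, pvSuffixesA]
          simp [ends_rev, hr0, List.cons_prefix_cons, pvCoreB, pvTokensB, hc2, Ne.symm hc2]
          refine String.toList_inj.mp ?_
          simp only [PySem.Str.toList_strip, PySem.Str.toList_slice, String.toList_ofList,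
            PySem.Chars.slice_eq_listSlice]
          rw [PySem.List.slice_to_neg_ofNat _ 4 (by omega), hl]
          rw [show ((z.reverse ++ [c2]) ++ [' ', 'i', 'i', 'i']).length - 4 = (z.reverse ++ [c2]).length by simp]
          rw [List.take_left]
    · -- token "iv"
      have htw : cleaned.toList.reverse.takeWhile (fun c => !decide (c = ' ')) = ['v', 'i'] := by
        have := congrArg List.reverse h; simpa using this
      rw [htw] at hr0
      rcases headR with _ | ⟨c2, z⟩
      · -- cleaned = " iv" with empty head
        simp only [pvCleanLoopA, pvSuffixesA]
        simp [ends_rev, hr0, List.cons_prefix_cons, pvCoreB, pvTokensB]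
        refine String.toList_inj.mp ?_
        have hl : cleaned.toList = ' ' :: ['i', 'v'] := by
          have := congrArg List.reverse hr0; simpa using this
        simp only [PySem.Str.toList_strip, PySem.Str.toList_slice, String.toList_ofList,
          PySem.Chars.slice_eq_listSlice]
        rw [PySem.List.slice_to_neg_ofNat _ 3 (by omega), hl]
        simp
      · by_cases hc2 : c2 = ','
        · -- ", iv" matches
          subst hc2
          have hl : cleaned.toList = z.reverse ++ [',', ' ', 'i', 'v'] := by
            have := congrArg List.reverse hr0; simpa using this
          simp only [pvCleanLoopA, pvSuffixesA]
          simp [ends_rev, hr0, List.cons_prefix_cons, pvCoreB, pvTokensB]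
          refine String.toList_inj.mp ?_
          simp only [PySem.Str.toList_strip, PySem.Str.toList_slice, String.toList_ofList,
            PySem.Chars.slice_eq_listSlice]
          rw [PySem.List.slice_to_neg_ofNat _ 4 (by omega), hl]
          rw [show (z.reverse ++ [',', ' ', 'i', 'v']).length - 4 = z.reverse.length by simp]
          rw [List.take_left]
        · -- " iv" matches, the head keeps c2
          have hl : cleaned.toList = (z.reverse ++ [c2]) ++ [' ', 'i', 'v'] := by
            have := congrArg List.reverse hr0; simpa using this
          simp only [pvCleanLoopA, pvSuffixesA]
          simp [ends_rev, hr0, List.cons_prefix_cons, pvCoreB, pvTokensB, hc2, Ne.symm hc2]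
          refine String.toList_inj.mp ?_
          simp only [PySem.Str.toList_strip, PySem.Str.toList_slice, String.toList_ofList,
            PySem.Chars.slice_eq_listSlice]
          rw [PySem.List.slice_to_neg_ofNat _ 3 (by omega), hl]
          rw [show ((z.reverse ++ [c2]) ++ [' ', 'i', 'v']).length - 3 = (z.reverse ++ [c2]).length by simp]
          rw [List.take_left]
    · -- token "v"
      have htw : cleaned.toList.reverse.takeWhile (fun c => !decide (c = ' ')) = ['v'] := by
        have := congrArg List.reverse h; simpa using this
      rw [htw] at hr0
      rcases headR with _ | ⟨c2, z⟩
      · -- cleaned = " v" with empty head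
        simp only [pvCleanLoopA, pvSuffixesA]
        simp [ends_rev, hr0, List.cons_prefix_cons, pvCoreB, pvTokensB]
        refine String.toList_inj.mp ?_
        have hl : cleaned.toList = ' ' :: ['v'] := by
          have := congrArg List.reverse hr0; simpa using this
        simp only [PySem.Str.toList_strip, PySem.Str.toList_slice, String.toList_ofList,
          PySem.Chars.slice_eq_listSlice]
        rw [PySem.List.slice_to_neg_ofNat _ 2 (by omega), hl]
        simp
      · by_cases hc2 : c2 = ','
        · -- ", v" matches
          subst hc2
          have hl : cleaned.toList = z.reverse ++ [',', ' ', 'v'] := by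
            have := congrArg List.reverse hr0; simpa using this
          simp only [pvCleanLoopA, pvSuffixesA]
          simp [ends_rev, hr0, List.cons_prefix_cons, pvCoreB, pvTokensB]
          refine String.toList_inj.mp ?_
          simp only [PySem.Str.toList_strip, PySem.Str.toList_slice, String.toList_ofList,
            PySem.Chars.slice_eq_listSlice]
          rw [PySem.List.slice_to_neg_ofNat _ 3 (by omega), hl]
          rw [show (z.reverse ++ [',', ' ', 'v']).length - 3 = z.reverse.length by simp]
          rw [List.take_left]
        · -- " v" matches, the head keeps c2
          have hl : cleaned.toList = (z.reverse ++ [c2]) ++ [' ', 'v'] := by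
            have := congrArg List.reverse hr0; simpa using this
          simp only [pvCleanLoopA, pvSuffixesA]
          simp [ends_rev, hr0, List.cons_prefix_cons, pvCoreB, pvTokensB, hc2, Ne.symm hc2]
          refine String.toList_inj.mp ?_
          simp only [PySem.Str.toList_strip, PySem.Str.toList_slice, String.toList_ofList,
            PySem.Chars.slice_eq_listSlice]
          rw [PySem.List.slice_to_neg_ofNat _ 2 (by omega), hl]
          rw [show ((z.reverse ++ [c2]) ++ [' ', 'v']).length - 2 = (z.reverse ++ [c2]).length by simp]
          rw [List.take_left]

-- ===== VERDICT (by name: the statement is the Claim_ definition above) =====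
theorem clean_last_name_spec : Claim_equal_clean_last_name := by
  intro lastname _
  unfold Spec_clean_last_name clean_last_name clean_last_name_alt
  exact pvCore_eq _
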